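-- pv_equiv track=rewrite | github.com/imanihosting/nemo-bantu | frontend/g2p.py | _fallback_rule_based
-- ===== SOURCE A (Python) =====
-- PRENASALIZED_CLUSTERS = ("mb", "nd", "ng")
--
-- def _fallback_rule_based(word: str) -> str:
--     # Preserve prenazalized clusters as single phones in fallback mode.
--     pieces: list[str] = []
--     i = 0
--     while i < len(word):
--         cluster = next((c for c in PRENASALIZED_CLUSTERS if word.startswith(c, i)), None)
--         if cluster is not None:
--             pieces.append(cluster)
--             i += len(cluster)
--             continue
--         pieces.append(word[i])
--         i += 1
--     return " ".join(pieces)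
-- ===== SOURCE B (Python) =====
-- def _fallback_rule_based(word: str) -> str:
--     # One-pass state machine: remember a pending nasal ('m'/'n') and emit a
--     # two-char cluster token when the next char completes "mb"/"nd"/"ng".
--     tokens: list[str] = []
--     pend = ""
--     for ch in word:
--         if pend and (pend + ch) in ("mb", "nd", "ng"):
--             tokens.append(pend + ch)
--             pend = ""
--         else:
--             if pend:
--                 tokens.append(pend)
--             if ch == "m" or ch == "n":
--                 pend = ch
--             else:
--                 pend = ""
--                 tokens.append(ch)
--     if pend:
--         tokens.append(pend)
--     return " ".join(tokens)
-- ===== Notes on version B (the rewrite author's own statement) =====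
-- stated objective: alternative
-- what changed: Replaced A's index-based while-loop that probes word.startswith via a generator over the cluster tuple at every position with a single for-loop state machine over the characters that carries a pending nasal ('m'/'n') and emits a cluster token when the next character completes mb/nd/ng.
import Mathlib
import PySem

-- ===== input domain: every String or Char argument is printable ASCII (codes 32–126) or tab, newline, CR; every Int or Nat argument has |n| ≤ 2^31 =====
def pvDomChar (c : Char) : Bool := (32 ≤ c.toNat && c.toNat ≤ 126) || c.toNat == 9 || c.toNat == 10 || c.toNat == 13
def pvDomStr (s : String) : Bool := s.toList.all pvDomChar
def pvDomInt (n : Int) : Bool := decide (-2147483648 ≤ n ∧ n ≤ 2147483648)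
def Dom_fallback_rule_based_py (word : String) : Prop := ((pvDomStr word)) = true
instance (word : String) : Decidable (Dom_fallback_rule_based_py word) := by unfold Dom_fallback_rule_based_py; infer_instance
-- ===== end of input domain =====

-- B replaces A's index-and-startswith while-loop with a one-pass state machine
-- carrying a pending nasal; objective: alternative (same cost, different traversal).

-- ===== PORT A =====
-- A's while-loop over index i, with the ordered next(...) over ("mb","nd","ng"),
-- transcribed as recursion on the unconsumed suffix of the character list
-- (advancing i = dropping consumed characters); the cluster search becomes the
-- same ordered prefix tests.
def pvGoA : List Char → List String
  | [] => []
  | c1 :: c2 :: rest =>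
    if c1 = 'm' ∧ c2 = 'b' then "mb" :: pvGoA rest
    else if c1 = 'n' ∧ c2 = 'd' then "nd" :: pvGoA rest
    else if c1 = 'n' ∧ c2 = 'g' then "ng" :: pvGoA rest
    else String.mk [c1] :: pvGoA (c2 :: rest)
  | [c1] => [String.mk [c1]]

def fallback_rule_based_py (word : String) : String :=
  PySem.Str.join " " (pvGoA word.toList)

-- ===== PORT B =====
-- Source B's membership test (pend+ch) in ("mb","nd","ng") — Python compares against
-- each tuple element in turn — ported as the same three equality tests.
def pvIsCluster (p ch : Char) : Bool :=
  (p = 'm' ∧ ch = 'b') ∨ (p = 'n' ∧ ch = 'd') ∨ (p = 'n' ∧ ch = 'g')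

def pvStepB (st : List String × Option Char) (ch : Char) : List String × Option Char :=
  match st with
  | (tokens, some p) =>
    if pvIsCluster p ch then (tokens ++ [String.mk [p, ch]], none)
    else
      let tokens := tokens ++ [String.mk [p]]
      if ch = 'm' ∨ ch = 'n' then (tokens, some ch)
      else (tokens ++ [String.mk [ch]], none)
  | (tokens, none) =>
    if ch = 'm' ∨ ch = 'n' then (tokens, some ch)
    else (tokens ++ [String.mk [ch]], none)

def pvFinishB (st : List String × Option Char) : List String :=
  match st with
  | (tokens, some p) => tokens ++ [String.mk [p]]
  | (tokens, none) => tokens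

def fallback_rule_based_py_alt (word : String) : String :=
  PySem.Str.join " " (pvFinishB (word.toList.foldl pvStepB ([], none)))

-- ===== PRECONDITION & SPEC =====
def Spec_fallback_rule_based_py (word : String) (out : String) : Prop := out = fallback_rule_based_py_alt word
instance (word : String) (out : String) : Decidable (Spec_fallback_rule_based_py word out) := by unfold Spec_fallback_rule_based_py; infer_instance

-- ===== CLAIM (what is proved, stated in full; the proofs are below) =====
def Claim_equal_fallback_rule_based_py : Prop := ∀ (word : String), Dom_fallback_rule_based_py word → Spec_fallback_rule_based_py word (fallback_rule_based_py word)

-- ===== LEMMAS AND PROOFS =====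

-- goA emits a pending nasal as a singleton token whenever the next character
-- does not complete a cluster with it.
theorem pvGoA_single (p : Char) (l : List Char) (h : ∀ c, l = [] ∨ (l.head? = some c → pvIsCluster p c = false)) :
    pvGoA (p :: l) = String.mk [p] :: pvGoA l := by
  cases l with
  | nil => simp [pvGoA]
  | cons c t =>
    have hc := h c
    simp at hc
    simp only [pvGoA]
    simp [pvIsCluster] at hc
    rcases hc with ⟨h1, h2, h3⟩
    rw [if_neg, if_neg, if_neg] <;> tauto

-- Main invariant: running B's fold from any token prefix and pending state
-- produces the prefix followed by A's tokenization of pending ++ remaining.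
theorem pvFold_eq (l : List Char) : ∀ (tokens : List String) (pend : Option Char),
    pvFinishB (l.foldl pvStepB (tokens, pend)) =
      tokens ++ pvGoA ((pend.map ([·])).getD [] ++ l) := by
  induction l with
  | nil =>
    intro tokens pend
    cases pend with
    | none => simp [pvFinishB, pvGoA]
    | some p => simp [pvFinishB, pvGoA]
  | cons ch t ih =>
    intro tokens pend
    cases pend with
    | none =>
      by_cases hm : ch = 'm' ∨ ch = 'n'
      · simp only [List.foldl_cons, pvStepB, if_pos hm]
        simpa using ih tokens (some ch)
      · simp only [List.foldl_cons, pvStepB, if_neg hm]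
        rw [ih (tokens ++ [String.mk [ch]]) none]
        have : pvGoA (ch :: t) = String.mk [ch] :: pvGoA t := by
          apply pvGoA_single
          intro c
          cases t with
          | nil => exact Or.inl rfl
          | cons c' t' =>
            refine Or.inr ?_
            intro hc
            simp at hc
            subst hc
            simp [pvIsCluster]
            push_neg at hm
            tauto
        simp [this]
    | some p =>
      by_cases hcl : pvIsCluster p ch = true
      · simp only [List.foldl_cons, pvStepB, if_pos hcl]
        rw [ih (tokens ++ [String.mk [p, ch]]) none]
        have : pvGoA (p :: ch :: t) = String.mk [p, ch] :: pvGoA t := by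
          simp [pvIsCluster] at hcl
          simp only [pvGoA]
          rcases hcl with ⟨h1, h2⟩ | ⟨h1, h2⟩ | ⟨h1, h2⟩ <;> subst h1 <;> subst h2 <;> simp <;> rfl
        simp [this]
      · have hstep : pvGoA (p :: ch :: t) = String.mk [p] :: pvGoA (ch :: t) := by
          apply pvGoA_single
          intro c
          refine Or.inr ?_
          intro hc
          simp at hc
          subst hc
          simpa using hcl
        by_cases hm : ch = 'm' ∨ ch = 'n'
        · simp only [List.foldl_cons, pvStepB, if_neg hcl, if_pos hm]
          rw [ih (tokens ++ [String.mk [p]]) (some ch)]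
          simp [hstep]
        · simp only [List.foldl_cons, pvStepB, if_neg hcl, if_neg hm]
          rw [ih (tokens ++ [String.mk [p]] ++ [String.mk [ch]]) none]
          have h2 : pvGoA (ch :: t) = String.mk [ch] :: pvGoA t := by
            apply pvGoA_single
            intro c
            cases t with
            | nil => exact Or.inl rfl
            | cons c' t' =>
              refine Or.inr ?_
              intro hc
              simp at hc
              subst hc
              simp [pvIsCluster]
              push_neg at hm
              tauto
          simp [hstep, h2]

-- ===== VERDICT (by name: the statement is the Claim_ definition above) =====
theorem fallback_rule_based_py_spec : Claim_equal_fallback_rule_based_py := by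
  intro word _
  unfold Spec_fallback_rule_based_py fallback_rule_based_py fallback_rule_based_py_alt
  rw [pvFold_eq word.toList [] none]
  simp
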